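-- pv_equiv track=rewrite | github.com/manwar/perlweeklychallenge-club | challenge-370/ulrich-rieke/python/ch-2.py | areScrambled
-- ===== SOURCE A (Python) =====
-- def areAnagrams(firstWord , secondWord):
--    firstSorted = sorted( firstWord )
--    secondSorted = sorted( secondWord )
--    return firstSorted == secondSorted
--
-- def areScrambled( firstWord , secondWord ):
--    wordlen = len( firstWord )
--    for i in range(1 , wordlen - 1):
--       if ( areAnagrams( firstWord[0:i] , secondWord[0:i] ) and \
--             areAnagrams( firstWord[i:] , secondWord[i:] ) ) or \
--            (areAnagrams( firstWord[i:] , secondWord[0:i]) and \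
--             areAnagrams( firstWord[0:i] , secondWord[i:] )):
--           return True
--    return False
-- ===== SOURCE B (Python) =====
-- def areScrambled(firstWord, secondWord):
--     n = len(firstWord)
--     if len(secondWord) != n:
--         # anagram halves force equal total lengths, so no split can succeed
--         return False
--     tot1 = [0] * 128
--     for ch in firstWord:
--         tot1[ord(ch)] += 1
--     tot2 = [0] * 128
--     for ch in secondWord:
--         tot2[ord(ch)] += 1
--     c1 = [0] * 128
--     c2 = [0] * 128
--     for a, b in zip(firstWord[:n - 2], secondWord[:n - 2]):
--         c1[ord(a)] += 1
--         c2[ord(b)] += 1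
--         s1 = [t - c for t, c in zip(tot1, c1)]
--         s2 = [t - c for t, c in zip(tot2, c2)]
--         if (c1 == c2 and s1 == s2) or (s1 == c2 and c1 == s2):
--             return True
--     return False
-- ===== Notes on version B (the rewrite author's own statement) =====
-- stated objective: faster
-- what changed: Replaces per-split sorting of all four slices with a single pass that maintains incremental 128-entry prefix character-count arrays (suffix counts obtained by subtracting from precomputed totals), plus an up-front length-equality short-circuit.
import Mathlib
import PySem

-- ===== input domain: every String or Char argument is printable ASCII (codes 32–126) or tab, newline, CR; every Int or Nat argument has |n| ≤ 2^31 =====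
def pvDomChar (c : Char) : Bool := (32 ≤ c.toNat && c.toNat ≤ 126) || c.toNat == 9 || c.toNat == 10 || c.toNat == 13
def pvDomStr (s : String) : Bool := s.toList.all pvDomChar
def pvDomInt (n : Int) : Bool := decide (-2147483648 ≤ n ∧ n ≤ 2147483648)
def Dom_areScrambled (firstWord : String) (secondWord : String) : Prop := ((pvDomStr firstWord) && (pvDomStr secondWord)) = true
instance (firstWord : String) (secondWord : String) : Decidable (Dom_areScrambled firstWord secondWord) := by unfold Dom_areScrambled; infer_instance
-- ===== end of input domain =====

-- B replaces A's per-split sorting of all four slices with one pass over incremental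
-- 128-entry prefix count arrays (suffix counts by subtraction); measured faster.

-- ===== PORT A =====
def areAnagramsPy (u v : List Char) : Bool :=
  PySem.List.sorted u (fun x => x) false == PySem.List.sorted v (fun x => x) false

def areScrambled (firstWord : String) (secondWord : String) : Bool :=
  let fl := firstWord.toList
  let sl := secondWord.toList
  let wordlen : Int := fl.length
  (PySem.List.pyRange 1 (wordlen - 1) 1).any (fun i =>
    (areAnagramsPy (PySem.List.slice fl (some 0) (some i)) (PySem.List.slice sl (some 0) (some i)) &&
     areAnagramsPy (PySem.List.slice fl (some i) none) (PySem.List.slice sl (some i) none)) ||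
    (areAnagramsPy (PySem.List.slice fl (some i) none) (PySem.List.slice sl (some 0) (some i)) &&
     areAnagramsPy (PySem.List.slice fl (some 0) (some i)) (PySem.List.slice sl (some i) none)))

-- ===== PORT B =====
-- c[ord(ch)] += 1  (inside Dom, ord(ch) < 128, so the index is in range; getD 0 is exact there)
def pvBump (c : List Int) (ch : Char) : List Int :=
  c.set ch.toNat (c.getD ch.toNat 0 + 1)

-- the counting loop 'for ch in w: tot[ord(ch)] += 1' started from [0]*128
def pvCounts (l : List Char) : List Int :=
  l.foldl pvBump (List.replicate 128 0)

-- [t - c for t, c in zip(tot, cnt)]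
def pvSub (t c : List Int) : List Int :=
  (t.zip c).map (fun p => p.1 - p.2)

-- the main 'for a, b in zip(...)' loop with its early return
def pvLoopB (tot1 tot2 : List Int) : List (Char × Char) → List Int → List Int → Bool
  | [], _, _ => false
  | (a, b) :: rest, c1, c2 =>
    let c1' := pvBump c1 a
    let c2' := pvBump c2 b
    let s1 := pvSub tot1 c1'
    let s2 := pvSub tot2 c2'
    if (c1' == c2' && s1 == s2) || (s1 == c2' && c1' == s2) then true
    else pvLoopB tot1 tot2 rest c1' c2'

def areScrambled_alt (firstWord : String) (secondWord : String) : Bool :=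
  let fl := firstWord.toList
  let sl := secondWord.toList
  let n := fl.length
  if sl.length ≠ n then false
  else
    pvLoopB (pvCounts fl) (pvCounts sl)
      ((fl.take (n - 2)).zip (sl.take (n - 2)))
      (List.replicate 128 0) (List.replicate 128 0)

-- ===== PRECONDITION & SPEC =====
def Spec_areScrambled (firstWord : String) (secondWord : String) (out : Bool) : Prop := out = areScrambled_alt firstWord secondWord
instance (firstWord : String) (secondWord : String) (out : Bool) : Decidable (Spec_areScrambled firstWord secondWord out) := by unfold Spec_areScrambled; infer_instance

-- ===== CLAIM (what is proved, stated in full; the proofs are below) =====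
def Claim_equal_areScrambled : Prop := ∀ (firstWord : String) (secondWord : String), Dom_areScrambled firstWord secondWord → Spec_areScrambled firstWord secondWord (areScrambled firstWord secondWord)

-- ===== LEMMAS AND PROOFS =====

-- the split condition, abstractly: the halves are anagrams straight or crossed
def CondPerm (fl sl : List Char) (j : Nat) : Prop :=
  ((fl.take j).Perm (sl.take j) ∧ (fl.drop j).Perm (sl.drop j)) ∨
  ((fl.drop j).Perm (sl.take j) ∧ (fl.take j).Perm (sl.drop j))

-- the same condition as B's loop tests it, through count arrays
def CondCnt (fl sl : List Char) (i : Nat) : Prop :=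
  (pvCounts (fl.take i) = pvCounts (sl.take i) ∧ pvCounts (fl.drop i) = pvCounts (sl.drop i)) ∨
  (pvCounts (fl.drop i) = pvCounts (sl.take i) ∧ pvCounts (fl.take i) = pvCounts (sl.drop i))

lemma areAnagramsPy_iff (u v : List Char) : areAnagramsPy u v = true ↔ u.Perm v := by
  unfold areAnagramsPy
  rw [beq_iff_eq]
  exact PySem.List.sorted_id_eq_sorted_id_iff_perm u v

lemma domChar_lt (c : Char) (h : pvDomChar c = true) : c.toNat < 128 := by
  unfold pvDomChar at h
  simp only [Bool.or_eq_true, Bool.and_eq_true, decide_eq_true_eq, beq_iff_eq] at h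
  omega

lemma foldl_bump_map (l : List Char) (f : Nat → Int) :
    l.foldl pvBump ((List.range 128).map fun k => f k)
      = (List.range 128).map (fun k => f k + (l.countP (fun ch => ch.toNat == k) : Int)) := by
  induction l generalizing f with
  | nil => simp
  | cons ch t ih =>
    have hb : pvBump ((List.range 128).map fun k => f k) ch
        = (List.range 128).map (fun k => f k + if ch.toNat = k then 1 else 0) := by
      apply List.ext_getElem
      · simp [pvBump]
      · intro k h1 h2
        simp only [pvBump, List.getElem_set, List.getElem_map, List.getElem_range]
        simp only [List.length_map, List.length_range] at h2
        by_cases hk : ch.toNat = k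
        · subst hk
          simp [List.getD_eq_getElem?_getD, h2]
        · simp [hk]
    rw [List.foldl_cons, hb, ih]
    apply List.map_congr_left
    intro k hk
    simp only [List.countP_cons]
    by_cases hc : ch.toNat = k
    · simp [hc]; ring
    · have : (ch.toNat == k) = false := by simp [hc]
      simp [hc, this]

lemma counts_eq_map (l : List Char) :
    pvCounts l = (List.range 128).map (fun k => (l.countP (fun ch => ch.toNat == k) : Int)) := by
  have h0 : (List.replicate 128 (0:Int)) = (List.range 128).map (fun _ => (0:Int)) := by
    simp
  unfold pvCounts
  rw [h0, foldl_bump_map]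
  simp

lemma char_eq_of_toNat_eq {a b : Char} (h : a.toNat = b.toNat) : a = b := by
  apply Char.ext
  exact UInt32.toNat_inj.mp h

lemma counts_eq_iff (u v : List Char) (hu : ∀ ch ∈ u, ch.toNat < 128)
    (hv : ∀ ch ∈ v, ch.toNat < 128) :
    (pvCounts u = pvCounts v ↔ u.Perm v) := by
  constructor
  · intro h
    rw [counts_eq_map, counts_eq_map] at h
    have hc : ∀ k, k < 128 → u.countP (fun ch => ch.toNat == k) = v.countP (fun ch => ch.toNat == k) := by
      intro k hk
      have h2 : ((List.range 128).map (fun k => (u.countP (fun ch => ch.toNat == k) : Int)))[k]?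
          = ((List.range 128).map (fun k => (v.countP (fun ch => ch.toNat == k) : Int)))[k]? := by rw [h]
      simp [hk] at h2
      exact_mod_cast h2
    rw [List.perm_iff_count]
    intro a
    by_cases ha : a.toNat < 128
    · have h1 : ∀ (w : List Char), w.count a = w.countP (fun ch => ch.toNat == a.toNat) := by
        intro w
        rw [List.count_eq_countP]
        apply List.countP_congr
        intro ch _
        constructor
        · intro hh; simp at hh ⊢; rw [hh]
        · intro hh; simp at hh ⊢; exact char_eq_of_toNat_eq hh
      rw [h1 u, h1 v, hc a.toNat ha]
    · rw [List.count_eq_zero.mpr (fun hmem => ha (hu a hmem)),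
          List.count_eq_zero.mpr (fun hmem => ha (hv a hmem))]
  · intro hp
    rw [counts_eq_map, counts_eq_map]
    apply List.map_congr_left
    intro k _
    rw [hp.countP_eq]

lemma sub_counts (l : List Char) (j : Nat) :
    pvSub (pvCounts l) (pvCounts (l.take j)) = pvCounts (l.drop j) := by
  rw [counts_eq_map l, counts_eq_map (l.take j), counts_eq_map (l.drop j)]
  unfold pvSub
  apply List.ext_getElem
  · simp
  · intro k h1 h2
    simp only [List.getElem_map, List.getElem_zip, List.getElem_range]
    have : l.countP (fun ch => ch.toNat == k)
        = (l.take j).countP (fun ch => ch.toNat == k) + (l.drop j).countP (fun ch => ch.toNat == k) := by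
      conv_lhs => rw [← List.take_append_drop j l]
      rw [List.countP_append]
    simp only [List.length_map, List.length_range] at h2
    rw [this]
    push_cast
    ring

lemma counts_append_singleton (x : List Char) (c : Char) :
    pvCounts (x ++ [c]) = pvBump (pvCounts x) c := by
  unfold pvCounts
  rw [List.foldl_append]
  rfl

lemma loopB_spec (fl sl : List Char) (hs : sl.length = fl.length) :
    ∀ (rest : List (Char × Char)) (j : Nat),
      ((fl.take (fl.length - 2)).zip (sl.take (fl.length - 2))).drop j = rest →
      (pvLoopB (pvCounts fl) (pvCounts sl) rest (pvCounts (fl.take j)) (pvCounts (sl.take j)) = true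
        ↔ ∃ i : Nat, j < i ∧ i ≤ fl.length - 2 ∧ CondCnt fl sl i) := by
  intro rest
  induction rest with
  | nil =>
    intro j hdrop
    have hlen : (((fl.take (fl.length - 2)).zip (sl.take (fl.length - 2))).drop j).length = 0 := by
      rw [hdrop]; rfl
    simp only [List.length_drop, List.length_zip, List.length_take, hs] at hlen
    simp only [pvLoopB]
    constructor
    · intro h; cases h
    · rintro ⟨i, h1, h2, _⟩; omega
  | cons p rest ih =>
    intro j hdrop
    obtain ⟨a, b⟩ := p
    have hjlen : j < ((fl.take (fl.length - 2)).zip (sl.take (fl.length - 2))).length := by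
      by_contra hge
      rw [List.drop_eq_nil_of_le (by omega)] at hdrop
      cases hdrop
    have hZlen : ((fl.take (fl.length - 2)).zip (sl.take (fl.length - 2))).length = fl.length - 2 := by
      simp [hs]
    have hjn : j < fl.length - 2 := by omega
    have hjf : j < fl.length := by omega
    have hjs : j < sl.length := by omega
    have hhead : ((fl.take (fl.length - 2)).zip (sl.take (fl.length - 2)))[j]'hjlen = (a, b) := by
      have h0 : (((fl.take (fl.length - 2)).zip (sl.take (fl.length - 2))).drop j)[0]'(by rw [hdrop]; simp) = (a, b) := by
        simp [hdrop]
      rw [List.getElem_drop] at h0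
      simpa using h0
    have ha : a = fl[j] := by
      have := hhead
      rw [List.getElem_zip] at this
      have h1 := congrArg Prod.fst this
      simpa [List.getElem_take] using h1.symm
    have hb : b = sl[j] := by
      have := hhead
      rw [List.getElem_zip] at this
      have h1 := congrArg Prod.snd this
      simpa [List.getElem_take] using h1.symm
    have htail : ((fl.take (fl.length - 2)).zip (sl.take (fl.length - 2))).drop (j + 1) = rest := by
      have : ((fl.take (fl.length - 2)).zip (sl.take (fl.length - 2))).drop (j+1)
          = (((fl.take (fl.length - 2)).zip (sl.take (fl.length - 2))).drop j).tail := by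
        rw [← List.drop_drop, List.drop_one]
      rw [this, hdrop]; rfl
    have hc1 : pvBump (pvCounts (fl.take j)) a = pvCounts (fl.take (j + 1)) := by
      rw [ha, ← counts_append_singleton]
      congr 1
      rw [List.take_add_one]
      simp [List.getElem?_eq_getElem hjf]
    have hc2 : pvBump (pvCounts (sl.take j)) b = pvCounts (sl.take (j + 1)) := by
      rw [hb, ← counts_append_singleton]
      congr 1
      rw [List.take_add_one]
      simp [List.getElem?_eq_getElem hjs]
    simp only [pvLoopB, hc1, hc2, sub_counts]
    by_cases hcond : CondCnt fl sl (j + 1)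
    · have : ((pvCounts (fl.take (j+1)) == pvCounts (sl.take (j+1)) && (pvCounts (fl.drop (j+1)) == pvCounts (sl.drop (j+1)))) ||
          (pvCounts (fl.drop (j+1)) == pvCounts (sl.take (j+1)) && (pvCounts (fl.take (j+1)) == pvCounts (sl.drop (j+1))))) = true := by
        rcases hcond with ⟨h1, h2⟩ | ⟨h1, h2⟩ <;> simp [h1, h2]
      rw [if_pos this]
      constructor
      · intro _; exact ⟨j + 1, by omega, by omega, hcond⟩
      · intro _; rfl
    · have : ((pvCounts (fl.take (j+1)) == pvCounts (sl.take (j+1)) && (pvCounts (fl.drop (j+1)) == pvCounts (sl.drop (j+1)))) ||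
          (pvCounts (fl.drop (j+1)) == pvCounts (sl.take (j+1)) && (pvCounts (fl.take (j+1)) == pvCounts (sl.drop (j+1))))) = false := by
        rw [Bool.eq_false_iff]
        intro h
        apply hcond
        simp only [Bool.or_eq_true, Bool.and_eq_true, beq_iff_eq] at h
        unfold CondCnt
        tauto
      rw [if_neg (by simp [this])]
      rw [ih (j + 1) htail]
      constructor
      · rintro ⟨i, h1, h2, h3⟩; exact ⟨i, by omega, h2, h3⟩
      · rintro ⟨i, h1, h2, h3⟩
        refine ⟨i, ?_, h2, h3⟩
        rcases Nat.lt_or_ge (j + 1) i with h | h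
        · exact h
        · have : i = j + 1 := by omega
          subst this
          exact absurd h3 hcond

lemma slice_zero_toNat (l : List Char) (i : Int) (h : 0 ≤ i) :
    PySem.List.slice l (some 0) (some i) = l.take i.toNat := by
  rw [PySem.List.slice_zero_start, PySem.List.slice_to l h]

lemma A_iff (f s : String) :
    areScrambled f s = true ↔
      ∃ j : Nat, 1 ≤ j ∧ j + 1 < f.toList.length ∧ CondPerm f.toList s.toList j := by
  unfold areScrambled
  simp only [List.any_eq_true]
  constructor
  · rintro ⟨i, hmem, hcond⟩
    rw [PySem.List.mem_pyRange_one] at hmem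
    obtain ⟨hi1, hi2⟩ := hmem
    have hi0 : 0 ≤ i := by omega
    rw [slice_zero_toNat _ _ hi0, slice_zero_toNat _ _ hi0,
        PySem.List.slice_from _ hi0, PySem.List.slice_from _ hi0] at hcond
    simp only [Bool.or_eq_true, Bool.and_eq_true, areAnagramsPy_iff] at hcond
    exact ⟨i.toNat, by omega, by omega, hcond⟩
  · rintro ⟨j, h1, h2, hc⟩
    refine ⟨(j : Int), ?_, ?_⟩
    · rw [PySem.List.mem_pyRange_one]
      constructor <;> [exact_mod_cast h1; (push_cast; omega)]
    · have hj0 : (0:Int) ≤ (j:Int) := by positivity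
      rw [slice_zero_toNat _ _ hj0, slice_zero_toNat _ _ hj0,
          PySem.List.slice_from _ hj0, PySem.List.slice_from _ hj0]
      simp only [Bool.or_eq_true, Bool.and_eq_true, areAnagramsPy_iff, Int.toNat_natCast]
      exact hc

lemma condPerm_len (fl sl : List Char) (j : Nat) (h1 : 1 ≤ j) (h2 : j + 1 < fl.length)
    (hc : CondPerm fl sl j) : sl.length = fl.length := by
  rcases hc with ⟨p1, p2⟩ | ⟨p1, p2⟩ <;>
  · have l1 := p1.length_eq
    have l2 := p2.length_eq
    simp only [List.length_take, List.length_drop] at l1 l2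
    omega

-- ===== VERDICT (by name: the statement is the Claim_ definition above) =====
theorem areScrambled_spec : Claim_equal_areScrambled := by
  intro f s hdom
  unfold Spec_areScrambled
  unfold Dom_areScrambled pvDomStr at hdom
  simp only [Bool.and_eq_true, List.all_eq_true] at hdom
  obtain ⟨hdf, hds⟩ := hdom
  have hfu : ∀ ch ∈ f.toList, ch.toNat < 128 := fun ch h => domChar_lt ch (hdf ch h)
  have hsu : ∀ ch ∈ s.toList, ch.toNat < 128 := fun ch h => domChar_lt ch (hds ch h)
  by_cases hm : s.toList.length = f.toList.length
  · have hB : areScrambled_alt f s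
        = pvLoopB (pvCounts f.toList) (pvCounts s.toList)
            ((f.toList.take (f.toList.length - 2)).zip (s.toList.take (f.toList.length - 2)))
            (List.replicate 128 0) (List.replicate 128 0) := by
      show (if s.toList.length ≠ f.toList.length then false else _) = _
      rw [if_neg (fun h => h hm)]
    rw [Bool.eq_iff_iff, A_iff, hB]
    have hloop := loopB_spec f.toList s.toList hm
        ((f.toList.take (f.toList.length - 2)).zip (s.toList.take (f.toList.length - 2))) 0 rfl
    have hinit : pvCounts (f.toList.take 0) = List.replicate 128 0 := rfl
    have hinit' : pvCounts (s.toList.take 0) = List.replicate 128 0 := rfl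
    rw [hinit, hinit'] at hloop
    rw [hloop]
    have hCC : ∀ i : Nat, (CondCnt f.toList s.toList i ↔ CondPerm f.toList s.toList i) := by
      intro i
      unfold CondCnt CondPerm
      rw [counts_eq_iff _ _ (fun ch h => hfu ch (List.take_subset _ _ h)) (fun ch h => hsu ch (List.take_subset _ _ h)),
          counts_eq_iff _ _ (fun ch h => hfu ch (List.drop_subset _ _ h)) (fun ch h => hsu ch (List.drop_subset _ _ h)),
          counts_eq_iff _ _ (fun ch h => hfu ch (List.drop_subset _ _ h)) (fun ch h => hsu ch (List.take_subset _ _ h)),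
          counts_eq_iff _ _ (fun ch h => hfu ch (List.take_subset _ _ h)) (fun ch h => hsu ch (List.drop_subset _ _ h))]
    constructor
    · rintro ⟨j, h1, h2, hc⟩
      exact ⟨j, by omega, by omega, (hCC j).mpr hc⟩
    · rintro ⟨i, h1, h2, hc⟩
      have hn3 : 3 ≤ f.toList.length := by
        by_contra hlt
        interval_cases h : f.toList.length <;> omega
      exact ⟨i, by omega, by omega, (hCC i).mp hc⟩
  · have hB : areScrambled_alt f s = false := by
      show (if s.toList.length ≠ f.toList.length then false else _) = _
      rw [if_pos hm]
    rw [hB, ← Bool.not_eq_true, A_iff]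
    rintro ⟨j, h1, h2, hc⟩
    exact hm (condPerm_len _ _ j h1 h2 hc)
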